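-- pv_equiv track=rewrite | github.com/ericmerle3789/Collatz-Junction-Theorem | research_log/R172_universal_constraints.py | all_parity_vectors
-- ===== SOURCE A (Python) =====
-- from itertools import combinations
--
-- def all_parity_vectors(k, x):
--     """Génère tous les vecteurs de parité aperiodiques de longueur k avec x uns."""
--     for positions in combinations(range(k), x):
--         v = tuple(0 if i not in positions else 1 for i in range(k))
--         # Vérifier apériodicité
--         is_aperiodic = True
--         for period in range(1, k):
--             if k % period == 0 and period < k:
--                 if v == v[:period] * (k // period):
--                     is_aperiodic = False
--                     break
--         if is_aperiodic:
--             yield v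
-- ===== SOURCE B (Python) =====
-- def all_parity_vectors(k, x):
--     """Génère tous les vecteurs de parité aperiodiques de longueur k avec x uns."""
--     # rows[r] = all 0/1 suffixes of length n with r ones, built iteratively
--     # (only feasible r kept: r <= x and the remaining prefix can supply x - r ones)
--     rows = {0: [()]}
--     for n in range(1, k + 1):
--         new = {}
--         for r in range(max(0, x - (k - n)), min(x, n) + 1):
--             ones = [(1,) + t for t in rows.get(r - 1, [])] if r > 0 else []
--             zeros = [(0,) + t for t in rows.get(r, [])]
--             new[r] = ones + zeros
--         rows = new
--     for v in rows.get(x, []):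
--         n = len(v)
--         if all(not (n % d == 0 and v[d:] == v[:-d]) for d in range(1, n)):
--             yield v
-- ===== Notes on version B (the rewrite author's own statement) =====
-- stated objective: alternative
-- what changed: B generates the 0/1 vectors directly by a ones-first recursion on the length (no position combinations and no per-element membership scan) and tests periodicity by the self-overlap comparison v[d:] == v[:-d] instead of rebuilding the tiled tuple v[:d]*(k//d).
import Mathlib
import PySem

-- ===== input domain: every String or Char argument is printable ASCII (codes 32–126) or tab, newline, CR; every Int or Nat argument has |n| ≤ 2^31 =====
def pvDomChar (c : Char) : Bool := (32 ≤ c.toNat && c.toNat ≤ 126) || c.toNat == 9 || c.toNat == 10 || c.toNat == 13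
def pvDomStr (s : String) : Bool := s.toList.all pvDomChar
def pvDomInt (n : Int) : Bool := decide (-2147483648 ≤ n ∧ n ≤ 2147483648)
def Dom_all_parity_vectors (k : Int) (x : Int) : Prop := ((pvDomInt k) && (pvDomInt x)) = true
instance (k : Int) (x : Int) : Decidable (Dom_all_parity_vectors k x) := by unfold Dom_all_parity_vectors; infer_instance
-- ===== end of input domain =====

-- B builds the 0/1 vectors bottom-up by an iterative DP over suffix lengths (no position
-- combinations and no per-element membership scan) and tests periodicity by the self-overlap
-- comparison v[d:] == v[:-d] instead of rebuilding the tiled tuple v[:d]*(k//d);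
-- objective: alternative (genuinely different construction and periodicity test, similar cost).
-- A is a generator; equivalence is about the yielded sequence of values (as a list).

-- ===== PORT A =====
-- port of itertools.combinations(l, r) (lexicographic order of position tuples)
def combosA (l : List Int) (r : Nat) : List (List Int) :=
  match r, l with
  | 0, _ => [[]]
  | _+1, [] => []
  | r'+1, a :: t => (combosA t r').map (fun p => a :: p) ++ combosA t (r'+1)

-- v = tuple(0 if i not in positions else 1 for i in range(k))
def buildA (l : List Int) (p : List Int) : List Int :=
  l.map (fun i => if !(p.contains i) then (0:Int) else 1)

-- the inner aperiodicity loop of A (early break = any)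
def aTest (k : Int) (v : List Int) : Bool :=
  !((PySem.List.pyRange 1 k 1).any (fun period =>
      PySem.Int.mod k period == 0 && decide (period < k) &&
      v == PySem.List.pyRepeat (PySem.List.slice v none (some period)) (PySem.Int.floordiv k period)))

def all_parity_vectors (k : Int) (x : Int) : List (List Int) :=
  ((combosA (PySem.List.pyRange 0 k 1) x.toNat).map (buildA (PySem.List.pyRange 0 k 1))).filter (aTest k)

-- ===== PORT B =====
-- all(not (n % d == 0 and v[d:] == v[:-d]) for d in range(1, n))
def bTest (v : List Int) : Bool :=
  let n : Int := (v.length : Int)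
  (PySem.List.pyRange 1 n 1).all (fun d =>
    !(PySem.Int.mod n d == 0 &&
      PySem.List.slice v (some d) none == PySem.List.slice v none (some (-d))))

-- new[r] = ([(1,)+t for t in rows.get(r-1, [])] if r > 0 else []) + [(0,)+t for t in rows.get(r, [])]
def bodyB (rows : PySem.Dict Int (List (List Int))) (r : Int) : List (List Int) :=
  (if r > 0 then (PySem.Dict.getD rows (r-1) []).map (fun t => (1:Int) :: t) else [])
    ++ (PySem.Dict.getD rows r []).map (fun t => (0:Int) :: t)

-- one iteration of the outer DP loop (for r in range(max(0, x-(k-n)), min(x, n)+1): ...)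
def stepB (k x : Int) (rows : PySem.Dict Int (List (List Int))) (n : Int) :
    PySem.Dict Int (List (List Int)) :=
  (PySem.List.pyRange (max 0 (x - (k - n))) (min x n + 1) 1).foldl
    (fun new r => PySem.Dict.insert new r (bodyB rows r)) PySem.Dict.empty

def all_parity_vectors_alt (k : Int) (x : Int) : List (List Int) :=
  (PySem.Dict.getD
      ((PySem.List.pyRange 1 (k+1) 1).foldl (stepB k x)
        (PySem.Dict.insert PySem.Dict.empty 0 [[]])) x []).filter bTest

-- ===== PRECONDITION & SPEC =====
-- Pre_ excludes x < 0, on which A raises ValueError (combinations with negative r).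
def Pre_all_parity_vectors (k : Int) (x : Int) : Prop := 0 ≤ x
instance (k : Int) (x : Int) : Decidable (Pre_all_parity_vectors k x) := by
  unfold Pre_all_parity_vectors; infer_instance

def pvWitness_all_parity_vectors : Int × Int := (4, 2)

def Spec_all_parity_vectors (k : Int) (x : Int) (out : List (List Int)) : Prop :=
  out = all_parity_vectors_alt k x
instance (k : Int) (x : Int) (out : List (List Int)) : Decidable (Spec_all_parity_vectors k x out) := by
  unfold Spec_all_parity_vectors; infer_instance

-- ===== CLAIM (what is proved, stated in full; the proofs are below) =====
def Claim_equal_all_parity_vectors : Prop := ∀ (k : Int) (x : Int), Dom_all_parity_vectors k x → Pre_all_parity_vectors k x → Spec_all_parity_vectors k x (all_parity_vectors k x)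
-- ===== LEMMAS AND PROOFS =====

-- proof-side spec: vectors of length n with r ones, ones-first (lexicographic) order
def vecsB (n : Nat) (r : Int) : List (List Int) :=
  match n with
  | 0 => if r == 0 then [[]] else []
  | m+1 =>
      (if r > 0 then (vecsB m (r-1)).map (fun t => (1:Int) :: t) else [])
        ++ (vecsB m r).map (fun t => (0:Int) :: t)


lemma combosA_subset : ∀ (l : List Int) (r : Nat) (p : List Int),
    p ∈ combosA l r → ∀ y ∈ p, y ∈ l := by
  intro l
  induction l with
  | nil =>
      intro r p hp y hy
      cases r with
      | zero => simp [combosA] at hp; subst hp; simp at hy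
      | succ r' => simp [combosA] at hp
  | cons a t ih =>
      intro r p hp y hy
      cases r with
      | zero => simp [combosA] at hp; subst hp; simp at hy
      | succ r' =>
          simp only [combosA, List.mem_append, List.mem_map] at hp
          rcases hp with ⟨q, hq, rfl⟩ | hp
          · rcases List.mem_cons.mp hy with rfl | hy'
            · exact List.mem_cons_self
            · exact List.mem_cons_of_mem _ (ih r' q hq y hy')
          · exact List.mem_cons_of_mem _ (ih (r'+1) p hp y hy)

lemma gen_eq : ∀ (l : List Int), l.Nodup → ∀ (r : Nat),
    (combosA l r).map (buildA l) = vecsB l.length (r : Int) := by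
  intro l
  induction l with
  | nil =>
      intro _ r
      cases r with
      | zero => simp [combosA, vecsB, buildA]
      | succ r' =>
          simp only [combosA, List.map_nil, List.length_nil, vecsB]
          rw [if_neg]
          simp only [beq_iff_eq]
          omega
  | cons a t ih =>
      intro hnd r
      have hat : a ∉ t := (List.nodup_cons.mp hnd).1
      have hnt : t.Nodup := (List.nodup_cons.mp hnd).2
      cases r with
      | zero =>
          have h0 := ih hnt 0
          simp [combosA, vecsB] at h0 ⊢
          simp [buildA] at h0 ⊢
          rw [← h0]
          simp
      | succ s =>
          have h1 := ih hnt s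
          have h2 := ih hnt (s+1)
          simp only [combosA, List.map_append, List.map_map]
          have e1 : (combosA t s).map (buildA (a :: t) ∘ fun p => a :: p)
              = ((combosA t s).map (buildA t)).map (fun v => (1:Int) :: v) := by
            rw [List.map_map]
            apply List.map_congr_left
            intro p _
            simp only [Function.comp, buildA, List.map_cons]
            have hca : (a :: p).contains a = true := by simp
            rw [hca]
            simp only [Bool.not_true]
            congr 1
            apply List.map_congr_left
            intro i hi
            have hia : i ≠ a := fun h => hat (h ▸ hi)
            simp [hia]
          have e2 : (combosA t (s+1)).map (buildA (a :: t))
              = ((combosA t (s+1)).map (buildA t)).map (fun v => (0:Int) :: v) := by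
            rw [List.map_map]
            apply List.map_congr_left
            intro p hp
            have hpa : a ∉ p := fun h => hat (combosA_subset t (s+1) p hp a h)
            simp only [Function.comp, buildA, List.map_cons]
            congr 1
            simp [hpa]
          rw [e1, e2, h1, h2]
          show _ = vecsB (t.length + 1) ((s+1 : Nat) : Int)
          have hpos : ((s+1 : Nat) : Int) > 0 := by positivity
          simp only [vecsB, if_pos hpos]
          rw [show ((s+1 : Nat) : Int) - 1 = (s : Int) by push_cast; ring]

lemma length_vecsB : ∀ (n : Nat) (r : Int) (v : List Int), v ∈ vecsB n r → v.length = n := by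
  intro n
  induction n with
  | zero =>
      intro r v hv
      by_cases h : r == 0 <;> simp [vecsB, h] at hv
      subst hv; rfl
  | succ m ih =>
      intro r v hv
      simp only [vecsB, List.mem_append, List.mem_map] at hv
      rcases hv with hv | ⟨t, ht, rfl⟩
      · by_cases h : r > 0
        · simp only [if_pos h, List.mem_map] at hv
          rcases hv with ⟨t, ht, rfl⟩
          simp [ih (r-1) t ht]
        · simp [if_neg h] at hv
      · simp [ih r t ht]

-- the core periodicity lemma: exact tiling by a block of length d ↔ self-overlap at shift d
lemma tile_iff {α : Type} (d : Nat) (hd : 0 < d) : ∀ (m : Nat) (v : List α),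
    v.length = d * m →
    ((v = (List.replicate m (v.take d)).flatten) ↔ v.drop d = v.take (v.length - d)) := by
  intro m
  induction m with
  | zero =>
      intro v hlen
      have : v = [] := List.length_eq_zero_iff.mp (by omega)
      subst this
      simp
  | succ n ih =>
      intro v hlen
      have hdle : d ≤ v.length := by nlinarith
      have hw : (v.take d).length = d := by rw [List.length_take]; omega
      have hsplit : v.take d ++ v.drop d = v := List.take_append_drop d v
      have hvl : v.length - d = d * n := by rw [hlen, Nat.mul_succ]; omega
      rw [hvl]
      have lhs_iff : (v = (List.replicate (n+1) (v.take d)).flatten)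
          ↔ v.drop d = (List.replicate n (v.take d)).flatten := by
        rw [List.replicate_succ, List.flatten_cons]
        constructor
        · intro h
          have := h
          conv at this => lhs; rw [← hsplit]
          exact List.append_cancel_left this
        · intro h
          conv_lhs => rw [← hsplit]
          rw [h]
      rw [lhs_iff]
      cases n with
      | zero =>
          simp only [List.replicate_zero, List.flatten_nil, Nat.mul_zero, List.take_zero]
      | succ j =>
          set w := v.take d with hwdef
          set u := v.drop d with hudef
          have hu : u.length = d * (j+1) := by
            rw [hudef, List.length_drop, hlen, Nat.mul_succ]; omega
          have hdd : d ≤ d * (j+1) := by nlinarith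
          have hjd : d * (j+1) - d = d * j := by rw [Nat.mul_succ]; omega
          constructor
          · intro h
            have hflat : (List.replicate (j+1) w).flatten
                = w ++ (List.replicate j w).flatten := by
              rw [List.replicate_succ, List.flatten_cons]
            have htk : v.take (d * (j+1)) = w ++ u.take (d * (j+1) - d) := by
              conv_lhs => rw [← hsplit]
              rw [List.take_append]
              congr 1
              · rw [hwdef, List.take_take]
                congr 1
                omega
              · congr 1
                omega
            rw [htk, hjd]
            have hutake : u.take (d * j) = (List.replicate j w).flatten := by
              rw [h]
              have hsplit2 : (List.replicate (j+1) w).flatten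
                  = (List.replicate j w).flatten ++ w := by
                rw [List.replicate_succ']
                simp
              rw [hsplit2]
              apply List.take_left'
              simp [hw]
              ring
            rw [hutake, h, hflat]
          · intro h
            have hutd : u.take d = w := by
              rw [h, List.take_take]
              rw [hwdef]
              congr 1
              omega
            have hudrop : u.drop d = u.take (u.length - d) := by
              conv_lhs => rw [h]
              rw [List.drop_take]
              congr 1
              omega
            have hres := (ih u hu).mpr hudrop
            rw [hutd] at hres
            exact hres

lemma any_congr_mem {α : Type} (l : List α) (p q : α → Bool)
    (h : ∀ a ∈ l, p a = q a) : l.any p = l.any q := by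
  induction l with
  | nil => rfl
  | cons a t ih =>
      simp only [List.any_cons, h a List.mem_cons_self,
        ih (fun b hb => h b (List.mem_cons_of_mem _ hb))]

lemma test_eq (k : Int) (v : List Int) (hlen : v.length = k.toNat) :
    aTest k v = bTest v := by
  by_cases hk : k ≤ 0
  · have h1 : PySem.List.pyRange 1 k 1 = [] := PySem.List.pyRange_one_eq_nil (by omega)
    have h0 : v.length = 0 := by omega
    have h2 : PySem.List.pyRange 1 ((v.length : Int)) 1 = [] := by
      rw [h0]; exact PySem.List.pyRange_one_eq_nil (by omega)
    simp [aTest, bTest, h1, h2]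
  · replace hk : 0 < k := by omega
    have hkl : (v.length : Int) = k := by
      rw [hlen]; exact Int.toNat_of_nonneg (le_of_lt hk)
    unfold aTest bTest
    simp only [hkl]
    rw [List.all_eq_not_any_not]
    refine congrArg (fun b => !b) (any_congr_mem _ _ _ ?_)
    intro d hd
    rw [PySem.List.mem_pyRange_one] at hd
    obtain ⟨hd1, hd2⟩ := hd
    have hdlt : decide (d < k) = true := by simp [hd2]
    simp only [hdlt, Bool.not_not, Bool.and_true]
    by_cases hm : PySem.Int.mod k d == 0
    · simp only [hm, Bool.true_and]
      -- k % d = 0; compare the two periodicity checks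
      have hd0 : (0:Int) < d := by omega
      have hmod : PySem.Int.mod k d = k % d := PySem.Int.mod_eq_emod_of_pos hd0
      have hdvd : d ∣ k := by
        have : PySem.Int.mod k d = 0 := by simpa using hm
        rw [hmod] at this
        exact Int.dvd_of_emod_eq_zero this
      have hfd : PySem.Int.floordiv k d = k / d := PySem.Int.floordiv_eq_ediv_of_pos hd0
      set dn := d.toNat with hdn
      set m := (k / d).toNat with hmn
      have hdcast : (dn : Int) = d := Int.toNat_of_nonneg (by omega)
      have hmcast : (m : Int) = k / d := Int.toNat_of_nonneg (Int.ediv_nonneg (by omega) (by omega))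
      have hdnpos : 0 < dn := by omega
      have hklen : v.length = dn * m := by
        have hk1 : k = d * (k / d) := by
          rw [Int.mul_comm]
          exact (Int.ediv_mul_cancel hdvd).symm
        have : (v.length : Int) = (dn : Int) * (m : Int) := by
          rw [hkl, hdcast, hmcast]; exact hk1
        exact_mod_cast this
      have hslice1 : PySem.List.slice v none (some d) = v.take dn := by
        rw [← hdcast]; exact PySem.List.slice_to_natCast v dn
      have hslice2 : PySem.List.slice v (some d) none = v.drop dn := by
        rw [← hdcast]; exact PySem.List.slice_from_natCast v dn
      have hslice3 : PySem.List.slice v none (some (-d)) = v.take (v.length - dn) := by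
        rw [← hdcast]; exact PySem.List.slice_to_neg_natCast v dn hdnpos
      rw [hslice1, hslice2, hslice3]
      have hrep : PySem.List.pyRepeat (v.take dn) (PySem.Int.floordiv k d)
          = (List.replicate m (v.take dn)).flatten := by
        unfold PySem.List.pyRepeat
        rw [hfd]
      rw [hrep]
      have hiff := tile_iff dn hdnpos m v hklen
      rcases Bool.eq_false_or_eq_true (v == (List.replicate m (v.take dn)).flatten) with h | h
      · rw [h]
        symm
        rw [beq_iff_eq] at h
        rw [beq_iff_eq]
        exact hiff.mp h
      · rw [h]
        symm
        rw [beq_eq_false_iff_ne] at h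
        rw [beq_eq_false_iff_ne]
        intro hq
        exact h (hiff.mpr hq)
    · simp only [Bool.not_eq_true] at hm
      simp [hm]


lemma vecsB_nil_of_gt : ∀ (n : Nat) (r : Int), (n : Int) < r → vecsB n r = [] := by
  intro n
  induction n with
  | zero =>
      intro r hr
      simp only [vecsB]
      rw [if_neg]
      simp only [beq_iff_eq]
      omega
  | succ m ih =>
      intro r hr
      simp only [vecsB]
      rw [ih r (by push_cast at hr ⊢; omega), ih (r-1) (by push_cast at hr ⊢; omega)]
      simp

lemma getD_foldl_insert (f : Int → List (List Int)) :
    ∀ (l : List Int) (d0 : PySem.Dict Int (List (List Int))) (r : Int),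
    PySem.Dict.getD (l.foldl (fun d r => PySem.Dict.insert d r (f r)) d0) r []
      = if r ∈ l then f r else PySem.Dict.getD d0 r [] := by
  intro l
  induction l with
  | nil => intro d0 r; simp
  | cons a t ih =>
      intro d0 r
      simp only [List.foldl_cons, ih, PySem.Dict.getD_insert, List.mem_cons]
      by_cases hrt : r ∈ t
      · simp [hrt]
      · by_cases hra : r = a <;> simp [hrt, hra]

lemma dp_step (k x : Int) (m : Nat)
    (rows : PySem.Dict Int (List (List Int)))
    (hrows : ∀ r : Int, PySem.Dict.getD rows r []
      = if max 0 (x - (k - (m : Int))) ≤ r ∧ r ≤ min x (m : Int) then vecsB m r else []) :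
    ∀ r : Int, PySem.Dict.getD (stepB k x rows ((m : Int) + 1)) r []
      = if max 0 (x - (k - ((m : Int) + 1))) ≤ r ∧ r ≤ min x ((m : Int) + 1)
        then vecsB (m + 1) r else [] := by
  intro r
  unfold stepB
  rw [getD_foldl_insert (bodyB rows)]
  rw [PySem.Dict.getD_empty]
  simp only [PySem.List.mem_pyRange_one]
  by_cases hc : max 0 (x - (k - ((m : Int) + 1))) ≤ r ∧ r ≤ min x ((m : Int) + 1)
  · rw [if_pos (by omega), if_pos hc]
    unfold bodyB
    simp only [vecsB]
    congr 1
    · by_cases hr0 : r > 0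
      · rw [if_pos hr0, if_pos hr0, hrows (r-1), if_pos (by omega)]
      · rw [if_neg hr0, if_neg hr0]
    · rw [hrows r]
      by_cases hrm : r ≤ (m : Int)
      · rw [if_pos (by omega)]
      · rw [if_neg (by omega), vecsB_nil_of_gt m r (by omega)]
  · rw [if_neg (by omega), if_neg hc]

lemma dp_run (k x : Int) (hx : 0 ≤ x) (hxk : x ≤ k) :
    ∀ (j : Nat), (j : Int) ≤ k →
    ∀ r : Int, PySem.Dict.getD
      ((PySem.List.pyRange 1 ((j : Int) + 1) 1).foldl (stepB k x)
        (PySem.Dict.insert PySem.Dict.empty 0 [[]])) r []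
      = if max 0 (x - (k - (j : Int))) ≤ r ∧ r ≤ min x (j : Int) then vecsB j r else [] := by
  intro j
  induction j with
  | zero =>
      intro _ r
      rw [PySem.List.pyRange_one_eq_nil (by omega)]
      simp only [List.foldl_nil, PySem.Dict.getD_insert, PySem.Dict.getD_empty]
      by_cases hr : r = 0
      · subst hr
        rw [if_pos rfl, if_pos (by omega)]
        simp [vecsB]
      · rw [if_neg hr, if_neg (by omega)]
  | succ m ih =>
      intro hjk r
      have hm : (m : Int) ≤ k := by push_cast at hjk ⊢; omega
      have hsplit : PySem.List.pyRange 1 (((m+1 : Nat) : Int) + 1) 1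
          = PySem.List.pyRange 1 ((m : Int) + 1) 1 ++ [(m : Int) + 1] := by
        have : (((m+1 : Nat) : Int) + 1) = ((m : Int) + 1) + 1 := by push_cast; ring
        rw [this]
        exact PySem.List.pyRange_one_succ_right (by omega)
      rw [hsplit, List.foldl_append]
      simp only [List.foldl_cons, List.foldl_nil]
      have hstep := dp_step k x m _ (ih hm)
      have hcast : ((m : Int) + 1) = ((m+1 : Nat) : Int) := by push_cast; ring
      rw [hcast] at hstep
      exact hstep r

lemma dp_final (k x : Int) (hx : 0 ≤ x) :
    PySem.Dict.getD
      ((PySem.List.pyRange 1 (k+1) 1).foldl (stepB k x)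
        (PySem.Dict.insert PySem.Dict.empty 0 [[]])) x []
      = vecsB k.toNat x := by
  by_cases hk : k ≤ 0
  · rw [PySem.List.pyRange_one_eq_nil (by omega)]
    simp only [List.foldl_nil, PySem.Dict.getD_insert, PySem.Dict.getD_empty]
    have hkn : k.toNat = 0 := by omega
    rw [hkn]
    simp only [vecsB]
    by_cases hx0 : x = 0
    · subst hx0; simp
    · rw [if_neg hx0, if_neg (by simpa [beq_iff_eq] using hx0)]
  · replace hk : 0 < k := by omega
    have hkc : ((k.toNat : Nat) : Int) = k := Int.toNat_of_nonneg (by omega)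
    by_cases hxk : x ≤ k
    · have h := dp_run k x hx hxk k.toNat (by omega) x
      rw [hkc] at h
      rw [h, if_pos (by constructor <;> omega)]
    · -- x > k: the final loop iteration only inserts keys r ≤ min x k < x
      have hk1 : (1:Int) ≤ k := by omega
      have hpeel : PySem.List.pyRange 1 (k+1) 1
          = PySem.List.pyRange 1 k 1 ++ [k] := PySem.List.pyRange_one_succ_right (by omega)
      rw [hpeel, List.foldl_append]
      simp only [List.foldl_cons, List.foldl_nil]
      unfold stepB
      rw [getD_foldl_insert, PySem.Dict.getD_empty]
      rw [if_neg]
      · rw [vecsB_nil_of_gt k.toNat x (by omega)]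
      · rw [PySem.List.mem_pyRange_one]
        omega

-- ===== VERDICT (by name: the statement is the Claim_ definition above) =====
theorem all_parity_vectors_spec : Claim_equal_all_parity_vectors := by
  intro k x _ hpre
  unfold Spec_all_parity_vectors all_parity_vectors all_parity_vectors_alt
  have hnd : (PySem.List.pyRange 0 k 1).Nodup := PySem.List.nodup_pyRange_one 0 k
  have hlen : (PySem.List.pyRange 0 k 1).length = k.toNat := by
    rw [PySem.List.length_pyRange_one]; simp
  have hx : ((x.toNat : Nat) : Int) = x := Int.toNat_of_nonneg hpre
  rw [gen_eq _ hnd x.toNat, hlen, hx, dp_final k x hpre]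
  apply List.filter_congr
  intro v hv
  exact test_eq k v (length_vecsB _ _ _ hv)
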